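-- pv_equiv track=rewrite | github.com/ameliekoch/cyberaka | christofides.py | insertedgestour
-- ===== SOURCE A (Python) =====
-- def insertedgestour(usededges, newedgetour, u):
--     rettour1 = []
--     rettour2 = []
--     onetwo = True
--     for edge in usededges:
--         if u not in edge and onetwo:
--             rettour1.append(edge)
--         elif u in edge and onetwo:
--             rettour1.append(edge)
--             onetwo = False
--         else:
--             rettour2.append(edge)
--     for edge in newedgetour:
--         rettour1.append(edge)
--
--     for edge in rettour2:
--         rettour1.append(edge)
--     return rettour1
-- ===== SOURCE B (Python) =====
-- def insertedgestour(usededges, newedgetour, u):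
--     idx = next((i for i, e in enumerate(usededges) if u in e), len(usededges) - 1)
--     return usededges[:idx + 1] + list(newedgetour) + usededges[idx + 1:]
-- ===== Notes on version B (the rewrite author's own statement) =====
-- stated objective: simpler
-- what changed: Replaces the stateful two-accumulator flag loop with locating the split index of the first edge containing u and returning three concatenated slices.
import Mathlib
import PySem

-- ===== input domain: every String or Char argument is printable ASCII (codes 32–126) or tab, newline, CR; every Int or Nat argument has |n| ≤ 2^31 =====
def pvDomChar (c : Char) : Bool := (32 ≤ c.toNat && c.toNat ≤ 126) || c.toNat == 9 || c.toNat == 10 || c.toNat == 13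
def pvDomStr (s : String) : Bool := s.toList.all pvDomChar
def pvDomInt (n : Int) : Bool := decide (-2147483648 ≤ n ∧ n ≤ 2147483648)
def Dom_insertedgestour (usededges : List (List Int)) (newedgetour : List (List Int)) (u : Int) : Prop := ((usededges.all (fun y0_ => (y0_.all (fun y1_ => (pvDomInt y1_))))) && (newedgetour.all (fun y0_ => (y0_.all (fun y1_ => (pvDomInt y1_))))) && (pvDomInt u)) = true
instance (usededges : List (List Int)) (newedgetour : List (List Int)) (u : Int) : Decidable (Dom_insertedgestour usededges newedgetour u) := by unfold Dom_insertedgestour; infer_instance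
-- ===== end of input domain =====

-- B replaces A's stateful two-accumulator flag loop by locating the split index
-- of the first edge containing u and concatenating three slices (objective: simpler).

-- ===== PORT A =====
-- one loop step: the three branches of A's for-loop body, state = (rettour1, rettour2, onetwo)
def pvStepA (u : Int) (st : List (List Int) × List (List Int) × Bool) (edge : List Int) :
    List (List Int) × List (List Int) × Bool :=
  if u ∉ edge ∧ st.2.2 = true then (st.1 ++ [edge], st.2.1, st.2.2)
  else if u ∈ edge ∧ st.2.2 = true then (st.1 ++ [edge], st.2.1, false)
  else (st.1, st.2.1 ++ [edge], st.2.2)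

def insertedgestour (usededges : List (List Int)) (newedgetour : List (List Int)) (u : Int) : List (List Int) :=
  let s := usededges.foldl (pvStepA u) ([], [], true)
  s.1 ++ newedgetour ++ s.2.1

-- ===== PORT B =====
-- Source B: idx = next((i for i,e in enumerate(usededges) if u in e), len(usededges)-1);
--       return usededges[:idx+1] + list(newedgetour) + usededges[idx+1:]
-- k below is idx+1; for the default case, len-1+1 = len on a nonempty list, and on the
-- empty list Python's idx+1 = 0 and Lean's k = 0 slice identically (both give []).
def pvSplitIdx (usededges : List (List Int)) (u : Int) : Nat :=
  match usededges.findIdx? (fun e => decide (u ∈ e)) with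
  | some i => i + 1
  | none => usededges.length

def insertedgestour_alt (usededges : List (List Int)) (newedgetour : List (List Int)) (u : Int) : List (List Int) :=
  let k := pvSplitIdx usededges u
  usededges.take k ++ newedgetour ++ usededges.drop k

-- ===== PRECONDITION & SPEC =====
def Spec_insertedgestour (usededges : List (List Int)) (newedgetour : List (List Int)) (u : Int) (out : List (List Int)) : Prop := out = insertedgestour_alt usededges newedgetour u
instance (usededges : List (List Int)) (newedgetour : List (List Int)) (u : Int) (out : List (List Int)) : Decidable (Spec_insertedgestour usededges newedgetour u out) := by unfold Spec_insertedgestour; infer_instance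

-- ===== CLAIM (what is proved, stated in full; the proofs are below) =====
def Claim_equal_insertedgestour : Prop := ∀ (usededges : List (List Int)) (newedgetour : List (List Int)) (u : Int), Dom_insertedgestour usededges newedgetour u → Spec_insertedgestour usededges newedgetour u (insertedgestour usededges newedgetour u)

-- ===== LEMMAS AND PROOFS =====

-- once the flag is down, every remaining edge goes to rettour2
theorem pv_foldl_false (u : Int) (es : List (List Int)) :
    ∀ (r1 r2 : List (List Int)),
      es.foldl (pvStepA u) (r1, r2, false) = (r1, r2 ++ es, false) := by
  induction es with
  | nil => simp
  | cons e es ih =>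
    intro r1 r2
    simp only [List.foldl_cons, pvStepA]
    simp [ih]

-- with the flag up, the fold splits at the first edge containing u
theorem pv_foldl_true (u : Int) (es : List (List Int)) :
    ∀ (r1 r2 : List (List Int)),
      es.foldl (pvStepA u) (r1, r2, true) =
        match es.findIdx? (fun e => decide (u ∈ e)) with
        | some i => (r1 ++ es.take (i + 1), r2 ++ es.drop (i + 1), false)
        | none => (r1 ++ es, r2, true) := by
  induction es with
  | nil => simp
  | cons e es ih =>
    intro r1 r2
    by_cases h : u ∈ e
    · simp only [List.foldl_cons, pvStepA, h, List.findIdx?_cons]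
      simp [pv_foldl_false]
    · simp only [List.foldl_cons, pvStepA, h, List.findIdx?_cons]
      simp only [not_false_eq_true, true_and, if_true, decide_false]
      rw [ih]
      cases hfi : es.findIdx? (fun e => decide (u ∈ e)) with
      | some i => simp [List.take_succ_cons, List.drop_succ_cons]
      | none => simp

-- ===== VERDICT (by name: the statement is the Claim_ definition above) =====
theorem insertedgestour_spec : Claim_equal_insertedgestour := by
  intro usededges newedgetour u _
  unfold Spec_insertedgestour insertedgestour insertedgestour_alt pvSplitIdx
  rw [pv_foldl_true]
  cases hfi : usededges.findIdx? (fun e => decide (u ∈ e)) with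
  | some i => simp
  | none => simp
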